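-- pv_equiv track=rewrite | github.com/liupengsay/PyIsTheBestLang | src/struct/monotonic_stack/problem.py | lc_2262
-- ===== SOURCE A (Python) =====
-- from collections import defaultdict, Counter
--
-- def lc_2262(s: str) -> int:
--     """
--     url: https://leetcode.cn/problems/total-appeal-of-a-string/
--     tag: prefix_suffix|monotonic_stack
--     """
--     n = len(s)
--     pre = defaultdict(lambda: -1)
--     ans = 0
--     for i in range(n):
--         ans += (i - pre[s[i]]) * (n - i)
--         pre[s[i]] = i
--     return ans
-- ===== SOURCE B (Python) =====
-- def _tri(L):
--     return L * (L + 1) // 2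
--
--
-- def lc_2262(s: str) -> int:
--     # Complementary counting: total appeal = sum over distinct chars c of
--     # (#substrings) - (#substrings avoiding c), the latter via maximal gaps.
--     n = len(s)
--     total = _tri(n)
--     ans = 0
--     for c in set(s):
--         avoided = 0
--         gap = 0
--         for ch in s:
--             if ch == c:
--                 avoided += _tri(gap)
--                 gap = 0
--             else:
--                 gap += 1
--         avoided += _tri(gap)
--         ans += total - avoided
--     return ans
-- ===== Notes on version B (the rewrite author's own statement) =====
-- stated objective: alternative
-- what changed: Replaces A's single pass with a previous-occurrence dict (summing (i-pre)*(n-i)) by complementary counting: for each distinct character, #substrings containing it = n(n+1)/2 minus the sum of L(L+1)/2 over maximal gaps between its occurrences.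
import Mathlib
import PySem

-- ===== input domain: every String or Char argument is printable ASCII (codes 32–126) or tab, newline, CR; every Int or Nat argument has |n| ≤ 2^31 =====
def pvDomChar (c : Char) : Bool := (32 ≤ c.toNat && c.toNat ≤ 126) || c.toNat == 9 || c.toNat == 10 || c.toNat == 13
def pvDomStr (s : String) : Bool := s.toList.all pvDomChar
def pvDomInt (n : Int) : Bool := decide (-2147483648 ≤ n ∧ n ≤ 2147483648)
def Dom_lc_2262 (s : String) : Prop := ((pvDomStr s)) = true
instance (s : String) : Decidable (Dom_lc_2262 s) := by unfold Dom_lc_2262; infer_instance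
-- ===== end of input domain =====

-- B re-implements A by complementary counting per distinct character (gap formula)
-- instead of A's single pass with a previous-occurrence dict; objective: alternative.

-- ===== PORT A =====
-- the body of A's 'for i in range(n)' loop (state: the dict 'pre' and 'ans')
def stepA (n : Int) (st : PySem.Dict Char Int × Int) (p : Int × Char) :
    PySem.Dict Char Int × Int :=
  (PySem.Dict.insert st.1 p.2 p.1,
   st.2 + (p.1 - PySem.Dict.getD st.1 p.2 (-1)) * (n - p.1))

def lc_2262 (s : String) : Int :=
  let l := s.toList
  let n : Int := (l.length : Int)
  ((PySem.List.enumerate l 0).foldl (stepA n) (PySem.Dict.empty, 0)).2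

-- ===== PORT B =====
-- helper _tri of Source B: L*(L+1)//2
def tri (x : Int) : Int := PySem.Int.floordiv (x * (x + 1)) 2

-- the body of B's inner 'for ch in s' loop (state: (avoided, gap))
def stepB (c : Char) (st : Int × Int) (ch : Char) : Int × Int :=
  if ch == c then (st.1 + tri st.2, 0) else (st.1, st.2 + 1)

def lc_2262_alt (s : String) : Int :=
  let l := s.toList
  let n : Int := (l.length : Int)
  let total := tri n
  (PySem.Set.ofList l).foldl
    (fun ans c =>
      let st := l.foldl (stepB c) (0, 0)
      let avoided := st.1 + tri st.2
      ans + (total - avoided)) 0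

-- ===== PRECONDITION & SPEC =====
def Spec_lc_2262 (s : String) (out : Int) : Prop := out = lc_2262_alt s
instance (s : String) (out : Int) : Decidable (Spec_lc_2262 s out) := by unfold Spec_lc_2262; infer_instance

-- ===== CLAIM (what is proved, stated in full; the proofs are below) =====
def Claim_equal_lc_2262 : Prop := ∀ (s : String), Dom_lc_2262 s → Spec_lc_2262 s (lc_2262 s)

-- ===== LEMMAS AND PROOFS =====

-- per-character reference sum: Σ over occurrences of c in the suffix t (absolute
-- index starting at j, previous occurrence at prev) of (i - prev_i) * (n - i)
def occSum (c : Char) (n : Int) : List Char → Int → Int → Int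
  | [], _, _ => 0
  | ch :: t, j, prev =>
      if ch = c then (j - prev) * (n - j) + occSum c n t (j + 1) j
      else occSum c n t (j + 1) prev

-- 'avoided' contribution of the suffix t when the running gap is g (incl. tail gap)
def innerGap (c : Char) : List Char → Int → Int
  | [], g => tri g
  | ch :: t, g => if ch = c then tri g + innerGap c t 0 else innerGap c t (g + 1)

theorem tri_two_mul (x : Int) : 2 * tri x = x * (x + 1) := by
  unfold tri
  rw [PySem.Int.floordiv_eq_ediv_of_pos (by norm_num)]
  exact Int.mul_ediv_cancel' ((Int.even_mul_succ_self x).two_dvd)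

theorem innerGap_eq (c : Char) (n : Int) :
    ∀ (t : List Char) (j prev : Int), j + t.length = n → prev < j →
      occSum c n t j prev = tri (n - prev - 1) - innerGap c t (j - prev - 1) := by
  intro t
  induction t with
  | nil =>
      intro j prev hn _
      have hj : j = n := by simpa using hn
      subst hj
      simp [occSum, innerGap]
  | cons ch t ih =>
      intro j prev hn hp
      have hn' : j + 1 + (t.length : Int) = n := by
        simp only [List.length_cons] at hn; push_cast at hn ⊢; omega
      by_cases h : ch = c
      · subst h
        rw [show occSum ch n (ch :: t) j prev
              = (j - prev) * (n - j) + occSum ch n t (j + 1) j from by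
            simp only [occSum, if_true]]
        rw [show innerGap ch (ch :: t) (j - prev - 1)
              = tri (j - prev - 1) + innerGap ch t 0 from by
            simp only [innerGap, if_true]]
        rw [ih (j + 1) j hn' (by omega), show (j : Int) + 1 - j - 1 = 0 from by ring]
        have t1 := tri_two_mul (n - j - 1)
        have t2 := tri_two_mul (n - prev - 1)
        have t3 := tri_two_mul (j - prev - 1)
        have key : 2 * ((j - prev) * (n - j)) + (n - j - 1) * (n - j - 1 + 1)
            = (n - prev - 1) * (n - prev - 1 + 1)
              - (j - prev - 1) * (j - prev - 1 + 1) := by ring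
        linarith
      · rw [show occSum c n (ch :: t) j prev = occSum c n t (j + 1) prev from by
            simp only [occSum]; rw [if_neg h]]
        rw [show innerGap c (ch :: t) (j - prev - 1)
              = innerGap c t (j - prev - 1 + 1) from by
            simp only [innerGap]; rw [if_neg h]]
        rw [ih (j + 1) prev hn' (by omega),
          show (j : Int) + 1 - prev - 1 = j - prev - 1 + 1 from by ring]

theorem foldB_eq (c : Char) :
    ∀ (t : List Char) (av g : Int),
      (t.foldl (stepB c) (av, g)).1 + tri (t.foldl (stepB c) (av, g)).2
        = av + innerGap c t g := by
  intro t
  induction t with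
  | nil => intro av g; simp [innerGap]
  | cons ch t ih =>
      intro av g
      by_cases h : ch = c
      · subst h
        simp only [List.foldl_cons, stepB, beq_self_eq_true, if_true]
        rw [ih]
        simp only [innerGap, if_true]; ring
      · have hb : (ch == c) = false := by simp [h]
        simp only [List.foldl_cons, stepB, hb, Bool.false_eq_true, if_false]
        rw [ih]
        simp only [innerGap]; rw [if_neg h]

-- extracting one summand from a map-sum over a Nodup index list
theorem sum_map_extract {α : Type} [DecidableEq α] :
    ∀ (C : List α) (x : α) (f g : α → Int) (e : Int), C.Nodup → x ∈ C →
      (∀ c ∈ C, c ≠ x → f c = g c) → f x = g x + e →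
      (C.map f).sum = (C.map g).sum + e := by
  intro C
  induction C with
  | nil => intro x f g e _ hx; simp at hx
  | cons a C ih =>
      intro x f g e hnd hx hne hfx
      rcases List.mem_cons.mp hx with h | h
      · subst h
        have hnotin : x ∉ C := (List.nodup_cons.mp hnd).1
        have : C.map f = C.map g := by
          apply List.map_congr_left
          intro c hc
          exact hne c (List.mem_cons_of_mem _ hc) (fun he => hnotin (he ▸ hc))
        simp [this, hfx]; ring
      · have hax : a ≠ x := by
          intro he; exact (List.nodup_cons.mp hnd).1 (he ▸ h)
        have hfa : f a = g a := hne a (List.mem_cons_self) hax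
        have := ih x f g e (List.nodup_cons.mp hnd).2 h
          (fun c hc => hne c (List.mem_cons_of_mem _ hc)) hfx
        simp [hfa, this]; ring

-- A's loop over the suffix t computes the per-character occurrence sums,
-- grouped over any Nodup index list C covering the characters of t
theorem foldA_eq (n : Int) :
    ∀ (t : List Char) (j : Int) (d : PySem.Dict Char Int) (ans : Int)
      (C : List Char), C.Nodup → (∀ ch ∈ t, ch ∈ C) →
      (∀ c, PySem.Dict.getD d c (-1) < j) →
      ((PySem.List.enumerate t j).foldl (stepA n) (d, ans)).2
        = ans + (C.map (fun c => occSum c n t j (PySem.Dict.getD d c (-1)))).sum := by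
  intro t
  induction t with
  | nil =>
      intro j d ans C _ _ _
      simp [PySem.List.enumerate_nil, occSum]
  | cons ch t ih =>
      intro j d ans C hnd hcov hlt
      rw [PySem.List.enumerate_cons]
      simp only [List.foldl_cons]
      have hlt' : ∀ c, PySem.Dict.getD (PySem.Dict.insert d ch j) c (-1) < j + 1 := by
        intro c
        rw [PySem.Dict.getD_insert]
        split_ifs with h
        · omega
        · exact lt_trans (hlt c) (by omega)
      have hIH := ih (j + 1) (PySem.Dict.insert d ch j)
        (ans + (j - PySem.Dict.getD d ch (-1)) * (n - j)) C hnd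
        (fun c hc => hcov c (List.mem_cons_of_mem _ hc)) hlt'
      rw [show stepA n (d, ans) (j, ch)
            = (PySem.Dict.insert d ch j,
               ans + (j - PySem.Dict.getD d ch (-1)) * (n - j)) from rfl]
      rw [hIH]
      have hextract := sum_map_extract C ch
        (fun c => occSum c n (ch :: t) j (PySem.Dict.getD d c (-1)))
        (fun c => occSum c n t (j + 1)
          (PySem.Dict.getD (PySem.Dict.insert d ch j) c (-1)))
        ((j - PySem.Dict.getD d ch (-1)) * (n - j))
        hnd (hcov ch List.mem_cons_self)
        (by
          intro c _ hne
          simp only [occSum]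
          rw [if_neg (fun he => hne he.symm), PySem.Dict.getD_insert,
            if_neg (fun he => hne he)])
        (by
          simp only [occSum, if_true]
          rw [PySem.Dict.getD_insert, if_pos rfl]
          ring)
      rw [hextract]; ring

theorem foldl_add' (g : Char → Int) :
    ∀ (C : List Char) (a : Int),
      C.foldl (fun ans c => ans + g c) a = a + (C.map g).sum := by
  intro C
  induction C with
  | nil => intro a; simp
  | cons x C ih => intro a; simp [ih]; ring

theorem main_eq (s : String) : lc_2262 s = lc_2262_alt s := by
  simp only [lc_2262, lc_2262_alt]
  rw [foldA_eq ((s.toList.length : Int)) s.toList 0 PySem.Dict.empty 0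
    (PySem.Set.ofList s.toList) (PySem.Set.nodup_ofList s.toList)
    (fun ch hch => (PySem.Set.mem_ofList s.toList ch).mpr hch)
    (by intro c; rw [PySem.Dict.getD_empty]; omega)]
  rw [foldl_add' (fun c =>
    tri (s.toList.length : Int)
      - ((s.toList.foldl (stepB c) (0, 0)).1
         + tri (s.toList.foldl (stepB c) (0, 0)).2)) (PySem.Set.ofList s.toList) 0]
  congr 1
  refine congrArg List.sum (List.map_congr_left ?_)
  intro c _
  rw [foldB_eq c s.toList 0 0, PySem.Dict.getD_empty]
  rw [innerGap_eq c ((s.toList.length : Int)) s.toList 0 (-1) (by omega) (by omega)]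
  norm_num

-- ===== VERDICT (by name: the statement is the Claim_ definition above) =====
theorem lc_2262_spec : Claim_equal_lc_2262 := by
  intro s _
  unfold Spec_lc_2262
  exact main_eq s
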